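-- pv_equiv track=rewrite | github.com/anthonytk31415/python-data-structures-and-algorithms | problems/strings/shiftingLetters.py | build_letter_shift
-- ===== SOURCE A (Python) =====
-- def build_letter_shift(s, shifts):
--     letter_shift = [0]*len(s)
--     for start, end, direction in shifts:
--         if direction == 0: direction = -1
--         letter_shift[start] += direction
--         if end+1 < len(letter_shift):
--             letter_shift[end+1] -= direction
--     # apply letter shift cumulative
--     for i in range(1, len(letter_shift)):
--         letter_shift[i] = letter_shift[i-1] + letter_shift[i]
--     return letter_shift
-- ===== SOURCE B (Python) =====
-- def build_letter_shift(s, shifts):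
--     result = [0] * len(s)
--     for start, end, direction in shifts:
--         d = -1 if direction == 0 else direction
--         result[start:] = [x + d for x in result[start:]]
--         result[end + 1:] = [x - d for x in result[end + 1:]]
--     return result
-- ===== Notes on version B (the rewrite author's own statement) =====
-- stated objective: alternative
-- what changed: B drops A's difference-array-plus-cumulative-sweep and instead applies each shift directly with two slice assignments, adding the normalized delta to the suffix from start and subtracting it from the suffix from end+1; Pre_ excludes only the inputs where A raises IndexError (start outside [-len(s), len(s)) or end+1 below -len(s)).
import Mathlib
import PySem

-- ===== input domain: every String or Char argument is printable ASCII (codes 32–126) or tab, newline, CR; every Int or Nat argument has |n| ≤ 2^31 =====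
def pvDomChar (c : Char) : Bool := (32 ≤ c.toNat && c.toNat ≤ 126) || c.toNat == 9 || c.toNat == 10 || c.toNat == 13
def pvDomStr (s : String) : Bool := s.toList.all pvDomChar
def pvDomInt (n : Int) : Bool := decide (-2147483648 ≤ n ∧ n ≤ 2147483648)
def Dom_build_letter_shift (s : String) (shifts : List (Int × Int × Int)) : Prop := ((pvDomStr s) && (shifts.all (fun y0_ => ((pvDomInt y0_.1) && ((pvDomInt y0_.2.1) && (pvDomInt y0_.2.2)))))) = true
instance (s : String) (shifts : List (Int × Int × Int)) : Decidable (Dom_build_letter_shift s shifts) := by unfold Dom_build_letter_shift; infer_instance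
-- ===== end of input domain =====

-- B replaces A's difference-array marks + cumulative sweep by direct per-shift slice updates (alternative algorithm, same results wherever A returns; Pre_ excludes exactly the inputs on which A raises IndexError).


-- ===== PORT A =====
-- body of A's first loop: the two difference-array marks for one (start, end, direction)
def pvStepA (l : List Int) (t : Int × Int × Int) : List Int :=
  let direction : Int := if t.2.2 = 0 then -1 else t.2.2
  let l1 := PySem.List.pySetD l t.1 (PySem.List.pyGetD l t.1 0 + direction)
  if t.2.1 + 1 < PySem.List.len l1 then
    PySem.List.pySetD l1 (t.2.1 + 1) (PySem.List.pyGetD l1 (t.2.1 + 1) 0 - direction)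
  else l1

-- body of A's second loop: letter_shift[i] = letter_shift[i-1] + letter_shift[i]
def pvCumStep (l : List Int) (i : Int) : List Int :=
  PySem.List.pySetD l i (PySem.List.pyGetD l (i - 1) 0 + PySem.List.pyGetD l i 0)

def build_letter_shift (s : String) (shifts : List (Int × Int × Int)) : List Int :=
  let letter_shift := shifts.foldl pvStepA (List.replicate s.length 0)
  (PySem.List.pyRange 1 (PySem.List.len letter_shift) 1).foldl pvCumStep letter_shift

-- ===== PORT B =====
-- body of B's loop: the two slice assignments result[start:] = [x+d …]; result[end+1:] = [x-d …]
def pvStepB (r : List Int) (t : Int × Int × Int) : List Int :=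
  let d : Int := if t.2.2 = 0 then -1 else t.2.2
  let r1 := PySem.List.slice r none (some t.1) ++ (PySem.List.slice r (some t.1) none).map (fun x => x + d)
  PySem.List.slice r1 none (some (t.2.1 + 1)) ++ (PySem.List.slice r1 (some (t.2.1 + 1)) none).map (fun x => x - d)

def build_letter_shift_alt (s : String) (shifts : List (Int × Int × Int)) : List Int :=
  shifts.foldl pvStepB (List.replicate s.length 0)

-- ===== PRECONDITION & SPEC =====
-- Pre_ excludes exactly the inputs on which A raises IndexError: a shift whose start is out of
-- index range for s (letter_shift[start] is evaluated unconditionally, even for empty ranges)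
-- or whose end+1 is below -len(s).
def Pre_build_letter_shift (s : String) (shifts : List (Int × Int × Int)) : Prop :=
  ∀ t ∈ shifts, -(s.length : Int) ≤ t.1 ∧ t.1 < (s.length : Int) ∧ -(s.length : Int) ≤ t.2.1 + 1
instance (s : String) (shifts : List (Int × Int × Int)) : Decidable (Pre_build_letter_shift s shifts) := by unfold Pre_build_letter_shift; infer_instance

def pvWitness_build_letter_shift : String × (List (Int × Int × Int)) := ("ab", [(0, 1, 1)])

def Spec_build_letter_shift (s : String) (shifts : List (Int × Int × Int)) (out : List Int) : Prop := out = build_letter_shift_alt s shifts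
instance (s : String) (shifts : List (Int × Int × Int)) (out : List Int) : Decidable (Spec_build_letter_shift s shifts out) := by unfold Spec_build_letter_shift; infer_instance

-- ===== CLAIM (what is proved, stated in full; the proofs are below) =====
def Claim_equal_build_letter_shift : Prop := ∀ (s : String) (shifts : List (Int × Int × Int)), Dom_build_letter_shift s shifts → Pre_build_letter_shift s shifts → Spec_build_letter_shift s shifts (build_letter_shift s shifts)

-- ===== LEMMAS AND PROOFS =====

-- prefix sums of l: the value A's cumulative pass computes
def pvCums (l : List Int) : List Int :=
  (List.range l.length).map (fun p => ∑ q ∈ Finset.range (p + 1), l.getD q 0)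

-- the value a Python slice assignment 'r[lo:] = [f(x) for x in r[lo:]]' produces, lo already resolved
def pvSuff (b : List Int) (lo : Nat) (f : Int → Int) : List Int :=
  b.take lo ++ (b.drop lo).map f

theorem pvCums_length (l : List Int) : (pvCums l).length = l.length := by
  simp [pvCums]

theorem pvSuff_length (b : List Int) (lo : Nat) (f : Int → Int) : (pvSuff b lo f).length = b.length := by
  simp [pvSuff]; omega

theorem pvSuff_full (b : List Int) (lo : Nat) (f : Int → Int) (h : b.length ≤ lo) :
    pvSuff b lo f = b := by
  simp [pvSuff, List.take_of_length_le h, List.drop_eq_nil_of_le h]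

theorem getElem_pvSuff (b : List Int) (lo : Nat) (f : Int → Int) (p : Nat)
    (hlo : lo ≤ b.length) (hp : p < b.length) :
    (pvSuff b lo f)[p]'(by rw [pvSuff_length]; exact hp)
      = if lo ≤ p then f (b[p]'hp) else b[p]'hp := by
  simp only [pvSuff]
  have hta : (b.take lo).length = lo := by simp; omega
  by_cases hc : lo ≤ p
  · rw [List.getElem_append_right (by omega), if_pos hc]
    simp only [List.getElem_map, List.getElem_drop]
    congr 1
    congr 1
    omega
  · rw [List.getElem_append_left (by omega), if_neg hc, List.getElem_take]

-- B's slice assignment equals pvSuff at the clamped index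
theorem pvSliceAsn (r : List Int) (a : Int) (f : Int → Int) :
    PySem.List.slice r none (some a) ++ (PySem.List.slice r (some a) none).map f
      = pvSuff r (PySem.List.clampIdx r.length a) f := by
  rw [PySem.List.slice_some_none]
  simp only [pvSuff]
  congr 1

theorem pvClampIdx_inRange (n : Nat) (a : Int) (h1 : -(n : Int) ≤ a) (h2 : a < (n : Int)) :
    PySem.List.clampIdx n a = (if a < 0 then a + n else a).toNat := by
  by_cases h : 0 ≤ a
  · have : a = ((a.toNat : Nat) : Int) := by omega
    rw [this, PySem.List.clampIdx_natCast]
    rw [if_neg (by omega)]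
    omega
  · have hk : 0 < (-a).toNat := by omega
    have ha : a = -(((-a).toNat : Nat) : Int) := by omega
    rw [ha, PySem.List.clampIdx_neg_natCast _ _ hk]
    rw [if_pos (by omega)]
    omega

theorem pvClampIdx_ge (n : Nat) (a : Int) (h : (n : Int) ≤ a) :
    PySem.List.clampIdx n a = n := by
  have : a = ((a.toNat : Nat) : Int) := by omega
  rw [this, PySem.List.clampIdx_natCast]
  omega

-- Python index resolution: a set through an in-range Int index is a set at the resolved Nat index
theorem pySetD_res (l : List Int) (i : Int) (v : Int)
    (h1 : -(l.length : Int) ≤ i) (h2 : i < l.length) :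
    PySem.List.pySetD l i v = l.set (if i < 0 then i + l.length else i).toNat v := by
  by_cases hneg : i < 0
  · simp only [PySem.List.pySetD, PySem.List.pySet?, PySem.List.pyIdx?, if_pos hneg]
    rw [if_neg (by omega : ¬ 0 ≤ i), if_pos h1]
    have h3 : l.length - (-i).toNat = (i + l.length).toNat := by omega
    simp [h3]
  · rw [if_neg hneg]
    exact PySem.List.pySetD_of_nonneg _ _ (by omega)

theorem pyGetD_res (l : List Int) (i : Int) (d : Int)
    (h1 : -(l.length : Int) ≤ i) (h2 : i < l.length) :
    PySem.List.pyGetD l i d = l.getD (if i < 0 then i + l.length else i).toNat d := by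
  by_cases hneg : i < 0
  · simp only [PySem.List.pyGetD, PySem.List.pyGet?, PySem.List.pyIdx?, if_pos hneg]
    rw [if_neg (by omega : ¬ 0 ≤ i), if_pos h1]
    have h3 : l.length - (-i).toNat = (i + l.length).toNat := by omega
    simp [h3, List.getD]
  · rw [if_neg hneg]
    simp only [PySem.List.pyGetD, PySem.List.pyGet?, PySem.List.pyIdx?]
    rw [if_pos (by omega : (0:Int) ≤ i), if_pos h2]
    simp [List.getD]

-- adding d at one position shifts every prefix sum from that position on by d
theorem pvCums_set (l : List Int) (i : Nat) (d : Int) (h : i < l.length) :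
    pvCums (l.set i (l.getD i 0 + d)) = pvSuff (pvCums l) i (fun x => x + d) := by
  apply List.ext_getElem
  · rw [pvSuff_length, pvCums_length, pvCums_length, List.length_set]
  intro p hp hp'
  have hplen : p < l.length := by
    rw [pvCums_length, List.length_set] at hp; exact hp
  have hgetD : ∀ q : Nat, (l.set i (l.getD i 0 + d)).getD q 0 = l.getD q 0 + if q = i then d else 0 := by
    intro q
    by_cases hq : q = i
    · subst hq
      simp [List.getD, h]
    · simp [List.getD, hq, Ne.symm hq]
  rw [getElem_pvSuff _ _ _ _ (by rw [pvCums_length]; omega) (by rw [pvCums_length]; exact hplen)]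
  simp only [pvCums, List.getElem_map, List.getElem_range, List.length_set]
  rw [Finset.sum_congr rfl (fun q _ => hgetD q), Finset.sum_add_distrib,
    Finset.sum_ite_eq' (Finset.range (p + 1)) i (fun _ => d)]
  simp only [Finset.mem_range]
  by_cases hip : i ≤ p <;> simp [hip]

-- A's cumulative pass over range(1, j), characterized entrywise
theorem pvCumPass_partial (l : List Int) (j : Nat) (h1 : 1 ≤ j) (hj : j ≤ l.length) :
    (PySem.List.pyRange 1 (j : Int) 1).foldl pvCumStep l
      = (List.range l.length).map
          (fun p => if p < j then ∑ q ∈ Finset.range (p + 1), l.getD q 0 else l.getD p 0) := by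
  induction j with
  | zero => omega
  | succ j ih =>
    by_cases hj0 : j = 0
    · subst hj0
      rw [PySem.List.pyRange_one_eq_nil (by omega)]
      apply List.ext_getElem
      · simp
      intro p hp hp'
      simp only [List.foldl_nil, List.getElem_map, List.getElem_range]
      by_cases hp0 : p = 0
      · subst hp0
        rw [if_pos (by omega), Finset.sum_range_one]
        exact (List.getD_eq_getElem l 0 (by simpa using hp)).symm
      · rw [if_neg (by omega)]
        exact (List.getD_eq_getElem l 0 (show p < l.length by simpa using hp)).symm
    · have hcast : ((j : Int) + 1) = ((j + 1 : Nat) : Int) := by push_cast; ring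
      rw [← hcast, PySem.List.pyRange_one_succ_right (by omega), List.foldl_append,
        ih (by omega) (by omega)]
      set M := (List.range l.length).map
          (fun p => if p < j then ∑ q ∈ Finset.range (p + 1), l.getD q 0 else l.getD p 0) with hM
      have hMlen : M.length = l.length := by simp [hM]
      have hjM : j < M.length := by omega
      simp only [List.foldl_cons, List.foldl_nil, pvCumStep]
      have hc1 : (j : Int) - 1 = ((j - 1 : Nat) : Int) := by omega
      rw [hc1, PySem.List.pySetD_natCast, PySem.List.pyGetD_natCast, PySem.List.pyGetD_natCast]
      have hv1 : M.getD (j - 1) 0 = ∑ q ∈ Finset.range j, l.getD q 0 := by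
        have hlt : j - 1 < M.length := by omega
        rw [List.getD_eq_getElem M 0 hlt]
        simp only [hM, List.getElem_map, List.getElem_range]
        rw [if_pos (by omega)]
        have hj1 : j - 1 + 1 = j := by omega
        rw [hj1]
      have hv2 : M.getD j 0 = l.getD j 0 := by
        rw [List.getD_eq_getElem M 0 hjM]
        simp only [hM, List.getElem_map, List.getElem_range]
        rw [if_neg (by omega)]
      rw [hv1, hv2]
      apply List.ext_getElem
      · simp [hM]
      intro p hp hp'
      simp only [List.getElem_map, List.getElem_range]
      by_cases hpj : p = j
      · subst hpj
        rw [List.getElem_set_self, if_pos (by omega), Finset.sum_range_succ]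
      · rw [List.getElem_set_ne (by omega)]
        simp only [hM, List.getElem_map, List.getElem_range]
        by_cases hc : p < j
        · rw [if_pos hc, if_pos (by omega)]
        · rw [if_neg hc, if_neg (by omega)]

theorem pvCumPass (l : List Int) :
    (PySem.List.pyRange 1 (PySem.List.len l) 1).foldl pvCumStep l = pvCums l := by
  by_cases hl : l.length = 0
  · rw [List.eq_nil_of_length_eq_zero hl]
    rfl
  · rw [PySem.List.len_eq, pvCumPass_partial l l.length (by omega) le_rfl]
    apply List.ext_getElem
    · simp [pvCums]
    intro p hp hp'
    simp only [pvCums, List.getElem_map, List.getElem_range]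
    rw [if_pos (by simpa using hp)]

theorem pvStepA_length (a : List Int) (t : Int × Int × Int) :
    (pvStepA a t).length = a.length := by
  simp only [pvStepA]
  split_ifs <;> simp [PySem.List.length_pySetD]

-- one shift commutes: prefix-summing A's two marks = B's two slice assignments
theorem pvStep_comm (a : List Int) (t : Int × Int × Int)
    (h1 : -(a.length : Int) ≤ t.1) (h2 : t.1 < (a.length : Int))
    (h3 : -(a.length : Int) ≤ t.2.1 + 1) :
    pvCums (pvStepA a t) = pvStepB (pvCums a) t := by
  simp only [pvStepA, pvStepB]
  set d : Int := if t.2.2 = 0 then -1 else t.2.2 with hd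
  have hclen : (pvCums a).length = a.length := pvCums_length a
  set i : Nat := (if t.1 < 0 then t.1 + (a.length : Int) else t.1).toNat with hi
  have hilen : i < a.length := by rw [hi]; split <;> omega
  have hresA1 : PySem.List.pySetD a t.1 (PySem.List.pyGetD a t.1 0 + d)
      = a.set i (a.getD i 0 + d) := by
    rw [pySetD_res a t.1 _ h1 h2, pyGetD_res a t.1 0 h1 h2]
  have hresB1 : PySem.List.slice (pvCums a) none (some t.1)
        ++ (PySem.List.slice (pvCums a) (some t.1) none).map (fun x => x + d)
      = pvSuff (pvCums a) i (fun x => x + d) := by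
    rw [pvSliceAsn, hclen, pvClampIdx_inRange a.length t.1 h1 h2]
  rw [hresA1, hresB1, ← pvCums_set a i d hilen]
  set l1 := a.set i (a.getD i 0 + d) with hl1
  have hlen1 : l1.length = a.length := by simp [hl1]
  have hlenI : PySem.List.len l1 = (a.length : Int) := by rw [PySem.List.len_eq, hlen1]
  have hc1len : (pvCums l1).length = a.length := by rw [pvCums_length, hlen1]
  have hmapneg : (fun x : Int => x - d) = (fun x : Int => x + (-d)) := by
    funext x; ring
  rw [hlenI, hmapneg]
  by_cases hb : t.2.1 + 1 < (a.length : Int)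
  · rw [if_pos hb]
    set k : Nat := (if t.2.1 + 1 < 0 then t.2.1 + 1 + (a.length : Int) else t.2.1 + 1).toNat with hk
    have hklen : k < a.length := by rw [hk]; split <;> omega
    have hresA2 : PySem.List.pySetD l1 (t.2.1 + 1) (PySem.List.pyGetD l1 (t.2.1 + 1) 0 - d)
        = l1.set k (l1.getD k 0 + (-d)) := by
      rw [pySetD_res l1 (t.2.1 + 1) _ (by rw [hlen1]; exact h3) (by rw [hlen1]; exact hb),
        pyGetD_res l1 (t.2.1 + 1) 0 (by rw [hlen1]; exact h3) (by rw [hlen1]; exact hb)]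
      rw [sub_eq_add_neg]
      congr 2 <;> rw [hlen1]
    rw [hresA2, pvCums_set l1 k (-d) (by omega), pvSliceAsn, hc1len,
      pvClampIdx_inRange a.length (t.2.1 + 1) h3 hb]
  · rw [if_neg hb, pvSliceAsn, hc1len, pvClampIdx_ge a.length (t.2.1 + 1) (by omega),
      pvSuff_full _ _ _ (by omega)]

-- the whole loop commutes
theorem pvMainInv (shifts : List (Int × Int × Int)) (a : List Int)
    (hval : ∀ t ∈ shifts, -(a.length : Int) ≤ t.1 ∧ t.1 < (a.length : Int) ∧ -(a.length : Int) ≤ t.2.1 + 1) :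
    pvCums (shifts.foldl pvStepA a) = shifts.foldl pvStepB (pvCums a) := by
  induction shifts generalizing a with
  | nil => rfl
  | cons t ts ih =>
    obtain ⟨ht, hts⟩ := List.forall_mem_cons.mp hval
    have hlen := pvStepA_length a t
    simp only [List.foldl_cons]
    rw [ih (pvStepA a t) (by rw [hlen]; exact hts),
      pvStep_comm a t ht.1 ht.2.1 ht.2.2]

theorem pvCums_replicate (n : Nat) : pvCums (List.replicate n (0 : Int)) = List.replicate n 0 := by
  apply List.ext_getElem <;> simp [pvCums]

-- ===== VERDICT (by name: the statement is the Claim_ definition above) =====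
theorem build_letter_shift_spec : Claim_equal_build_letter_shift := by
  intro s shifts _ hpre
  unfold Spec_build_letter_shift build_letter_shift build_letter_shift_alt
  have hval := pvMainInv shifts (List.replicate s.length 0)
    (by simp only [List.length_replicate]; exact hpre)
  rw [pvCumPass, hval]
  simp [pvCums_replicate]
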